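-- pv_equiv track=rewrite | github.com/pipphxntom/AnswerGraph | src/ingest/pdf/enhanced_processor.py | _find_split_points
-- ===== SOURCE A (Python) =====
-- from typing import List, Dict, Any, Optional, AsyncGenerator
--
-- def _find_split_points(text: str) -> List[int]:
--     """Find logical split points in text."""
--     # Paragraph breaks
--     paragraphs = text.split("\n\n")
--     points = []
--     pos = 0
--
--     for p in paragraphs:
--         pos += len(p) + 2  # +2 for the "\n\n"
--         points.append(pos)
--
--     # Remove the last point which would be at the end of text
--     if points and points[-1] >= len(text):
--         points.pop()
--
--     # If no paragraph breaks, use sentences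
--     if not points:
--         for i, char in enumerate(text):
--             if char in '.!?' and i < len(text) - 1 and text[i + 1] in ' \n\t':
--                 points.append(i + 2)  # +2 to include the period and space
--
--     return points
-- ===== SOURCE B (Python) =====
-- from typing import List
--
-- def _find_split_points(text: str) -> List[int]:
--     """Find logical split points in text."""
--     points = []
--     n = len(text)
--     i = 0
--     while i + 1 < n:
--         if text[i] == "\n" and text[i + 1] == "\n":
--             points.append(i + 2)
--             i += 2
--         else:
--             i += 1
--
--     if not points:
--         points = [i + 2 for i, (c, nxt) in enumerate(zip(text, text[1:]))
--                   if c in '.!?' and nxt in ' \n\t']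
--
--     return points
-- ===== Notes on version B (the rewrite author's own statement) =====
-- stated objective: alternative
-- what changed: B locates each paragraph delimiter (two consecutive newlines) by one direct scan over the characters, emitting delimiter-start+2 as it goes, instead of splitting the text on the delimiter and accumulating cumulative piece lengths plus an artificial trailing point that must be popped; the sentence fallback becomes a comprehension over adjacent character pairs.
import Mathlib
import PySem

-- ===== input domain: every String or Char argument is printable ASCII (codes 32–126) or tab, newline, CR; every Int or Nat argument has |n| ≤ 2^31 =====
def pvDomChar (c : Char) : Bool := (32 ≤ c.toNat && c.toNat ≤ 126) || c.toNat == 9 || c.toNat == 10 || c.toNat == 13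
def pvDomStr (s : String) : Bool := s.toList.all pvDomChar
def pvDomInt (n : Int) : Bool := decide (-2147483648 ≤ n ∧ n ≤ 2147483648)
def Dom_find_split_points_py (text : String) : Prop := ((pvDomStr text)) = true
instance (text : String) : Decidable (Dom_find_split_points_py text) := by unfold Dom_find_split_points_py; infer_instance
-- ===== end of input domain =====

-- B locates each "\n\n" delimiter by one direct scan (and a pair-zip comprehension for the
-- sentence fallback) instead of A's split-on-"\n\n" + cumulative-length accumulation + pop.


-- ===== PORT A =====
-- text.split("\n\n") → PySem.Chars.splitOn on the char list (sep ≠ ""); the for-loop is a foldl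
-- over (points, pos); points[-1] → PySem.List.pyGet? points (-1); points.pop() → dropLast.
def find_split_points_py (text : String) : List Int :=
  let paragraphs := PySem.Chars.splitOn text.toList ['\n', '\n']
  let st := paragraphs.foldl
    (fun (st : List Int × Int) p =>
      (st.1 ++ [st.2 + (p.length : Int) + 2], st.2 + (p.length : Int) + 2)) ([], 0)
  let points := st.1
  let points :=
    if points ≠ [] ∧ (PySem.List.pyGet? points (-1)).getD 0 ≥ (text.toList.length : Int)
    then points.dropLast else points
  if points = [] then
    (PySem.List.enumerate text.toList).foldl
      (fun acc ic =>
        if ((ic.2 == '.' || ic.2 == '!' || ic.2 == '?')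
            && decide (ic.1 < (text.toList.length : Int) - 1)
            && (PySem.List.pyGet? text.toList (ic.1 + 1)).elim false
                 (fun d => d == ' ' || d == '\n' || d == '\t'))
        then acc ++ [ic.1 + 2] else acc) []
  else points

-- ===== PORT B =====
-- the while-loop of Source B: i is the absolute position of the head of the remaining char list
def fspAltScan : List Char → Int → List Int
  | '\n' :: '\n' :: rest, i => (i + 2) :: fspAltScan rest (i + 2)
  | _ :: rest, i => fspAltScan rest (i + 1)
  | [], _ => []

-- the fallback comprehension over enumerate(zip(text, text[1:]))
def fspAltSent (text : String) : List Int :=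
  (PySem.List.enumerate (text.toList.zip text.toList.tail)).filterMap
    (fun p =>
      if ((p.2.1 == '.' || p.2.1 == '!' || p.2.1 == '?')
          && (p.2.2 == ' ' || p.2.2 == '\n' || p.2.2 == '\t'))
      then some (p.1 + 2) else none)

def find_split_points_py_alt (text : String) : List Int :=
  let points := fspAltScan text.toList 0
  if points = [] then fspAltSent text else points

-- ===== PRECONDITION & SPEC =====
def Spec_find_split_points_py (text : String) (out : List Int) : Prop := out = find_split_points_py_alt text
instance (text : String) (out : List Int) : Decidable (Spec_find_split_points_py text out) := by unfold Spec_find_split_points_py; infer_instance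

-- ===== CLAIM (what is proved, stated in full; the proofs are below) =====
def Claim_equal_find_split_points_py : Prop := ∀ (text : String), Dom_find_split_points_py text → Spec_find_split_points_py text (find_split_points_py text)

-- ===== LEMMAS AND PROOFS =====

-- structural characterisation of splitOn on the fixed separator "\n\n"
def splitNN : List Char → List Char → List (List Char)
  | '\n' :: '\n' :: rest, cur => cur.reverse :: splitNN rest []
  | c :: rest, cur => splitNN rest (c :: cur)
  | [], cur => [cur.reverse]

theorem splitOn_go_eq_splitNN : ∀ (fuel : Nat) (l cur : List Char) (acc : List (List Char)),
    l.length < fuel →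
    PySem.Chars.splitOn.go ['\n', '\n'] fuel l cur acc = acc.reverse ++ splitNN l cur := by
  intro fuel
  induction fuel with
  | zero => intro l cur acc h; omega
  | succ f ih =>
    rintro (_ | ⟨c, rest⟩) cur acc h
    · simp [PySem.Chars.splitOn.go, splitNN]
    · rw [PySem.Chars.splitOn.go]
      by_cases hp : List.isPrefixOf ['\n', '\n'] (c :: rest) = true
      · rcases rest with _ | ⟨d, rest'⟩
        · simp [List.isPrefixOf] at hp
        · simp [List.isPrefixOf] at hp
          obtain ⟨rfl, rfl⟩ : c = '\n' ∧ d = '\n' := ⟨hp.1.symm, hp.2.symm⟩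
          rw [if_pos (by simp [List.isPrefixOf])]
          rw [show List.drop (['\n', '\n'].length) ('\n' :: '\n' :: rest') = rest' from rfl]
          rw [ih rest' [] (cur.reverse :: acc) (by simp at h ⊢; omega)]
          simp [splitNN]
      · rw [if_neg hp]
        rw [ih rest (c :: cur) acc (by simp at h ⊢; omega)]
        rw [splitNN.eq_2]
        rintro rest'' rfl rfl
        exact hp (by simp [List.isPrefixOf])

theorem splitOn_eq_splitNN (l : List Char) :
    PySem.Chars.splitOn l ['\n', '\n'] = splitNN l [] := by
  rw [PySem.Chars.splitOn]
  exact (splitOn_go_eq_splitNN (l.length + 1) l [] [] (by omega)).trans (by simp)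

-- the cumulative-length fold over splitNN produces the scan points plus one trailing point
theorem foldl_splitNN : ∀ (l cur : List Char) (pts : List Int) (pos : Int),
    (splitNN l cur).foldl
      (fun (st : List Int × Int) p =>
        (st.1 ++ [st.2 + (p.length : Int) + 2], st.2 + (p.length : Int) + 2)) (pts, pos)
    = (pts ++ fspAltScan l (pos + cur.length) ++ [pos + cur.length + l.length + 2],
       pos + cur.length + l.length + 2) := by
  intro l cur
  induction l, cur using splitNN.induct with
  | case1 rest cur ih =>
    intro pts pos
    rw [splitNN.eq_1]
    simp only [List.foldl_cons, List.length_reverse]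
    rw [ih]
    rw [fspAltScan.eq_1]
    simp only [Prod.mk.injEq, List.length_nil, List.length_cons, List.append_assoc,
      List.cons_append, List.nil_append, Nat.cast_zero, Nat.cast_add]
    push_cast
    ring_nf
    simp
  | case2 c rest cur hne ih =>
    intro pts pos
    rw [splitNN.eq_2 _ _ _ hne]
    rw [ih]
    rw [fspAltScan.eq_2 _ _ _ (fun r hc hr => hne r hc hr)]
    simp only [Prod.mk.injEq, List.length_cons, List.append_assoc]
    push_cast
    ring_nf
    simp
  | case3 cur =>
    intro pts pos
    rw [splitNN.eq_3, fspAltScan.eq_3]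
    simp only [List.foldl_cons, List.foldl_nil, List.length_reverse, List.length_nil,
      Prod.mk.injEq, Nat.cast_zero]
    ring_nf
    simp

-- A's fallback loop equals B's pair-zip comprehension
theorem fallback_eq (full : List Char) : ∀ (l : List Char) (k : Nat) (acc : List Int),
    full.drop k = l →
    (PySem.List.enumerate l (k : Int)).foldl
      (fun acc ic =>
        if ((ic.2 == '.' || ic.2 == '!' || ic.2 == '?')
            && decide (ic.1 < (full.length : Int) - 1)
            && (PySem.List.pyGet? full (ic.1 + 1)).elim false
                 (fun d => d == ' ' || d == '\n' || d == '\t'))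
        then acc ++ [ic.1 + 2] else acc) acc
    = acc ++ (PySem.List.enumerate (l.zip l.tail) (k : Int)).filterMap
        (fun p =>
          if ((p.2.1 == '.' || p.2.1 == '!' || p.2.1 == '?')
              && (p.2.2 == ' ' || p.2.2 == '\n' || p.2.2 == '\t'))
          then some (p.1 + 2) else none) := by
  intro l
  induction l with
  | nil => intro k acc h; simp [PySem.List.enumerate]
  | cons c rest ih =>
    intro k acc h
    have hk : k < full.length := by
      by_contra hge
      have hnil : full.drop k = [] := List.drop_eq_nil_of_le (by omega)
      rw [hnil] at h
      simp at h
    have hlen : full.length = k + 1 + rest.length := by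
      have := congrArg List.length h
      simp [List.length_drop] at this
      omega
    have hd1 : full.drop (k + 1) = rest := by
      have := congrArg List.tail h
      rwa [← List.drop_one, List.drop_drop] at this
    have hcast : ((k : Int) + 1) = ((k + 1 : Nat) : Int) := by push_cast; ring
    have hget : PySem.List.pyGet? full (((k + 1 : Nat)) : Int) = rest.head? := by
      rw [PySem.List.pyGet?_natCast, ← hd1, List.head?_eq_getElem?, List.getElem?_drop]
    rcases rest with _ | ⟨d, rest'⟩
    · have hcond : decide ((k : Int) < (full.length : Int) - 1) = false := by
        simp only [decide_eq_false_iff_not, hlen, List.length_nil]; push_cast; omega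
      simp only [List.tail_cons, List.zip_nil_right, PySem.List.enumerate, List.filterMap_nil,
        List.append_nil, List.foldl_cons, List.foldl_nil]
      rw [hcond]
      simp
    · have hcondT : decide ((k : Int) < (full.length : Int) - 1) = true := by
        simp only [decide_eq_true_eq, hlen, List.length_cons]; push_cast; omega
      have henum : PySem.List.enumerate (c :: d :: rest') (k : Int)
          = ((k : Int), c) :: PySem.List.enumerate (d :: rest') ((k : Int) + 1) := by
        simp [PySem.List.enumerate]
      rw [henum]
      simp only [List.foldl_cons]
      rw [hcast, ih (k + 1) _ hd1]
      simp only [List.tail_cons, List.zip_cons_cons]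
      have hget2 : PySem.List.pyGet? full ((k : Int) + 1) = some d := by
        rw [hcast, hget]; rfl
      have hlt : (k : Int) < (full.length : Int) - 1 := by
        simp only [hlen, List.length_cons]; push_cast; omega
      by_cases hP : ((c = '.' ∨ c = '!') ∨ c = '?') ∧ ((d = ' ' ∨ d = '\n') ∨ d = '\t')
      · simp [hget2, hlt, hP.1, hP.2]
      · simp [hget2, hlt, hP]

theorem pyGet?_neg_one_concat (ys : List Int) (x : Int) :
    PySem.List.pyGet? (ys ++ [x]) (-1) = some x := by
  simp [PySem.List.pyGet?, PySem.List.pyIdx?]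

-- ===== VERDICT (by name: the statement is the Claim_ definition above) =====
theorem find_split_points_py_spec : Claim_equal_find_split_points_py := by
  intro text _
  unfold Spec_find_split_points_py find_split_points_py find_split_points_py_alt
  simp only [splitOn_eq_splitNN]
  rw [foldl_splitNN]
  simp only [List.length_nil, Nat.cast_zero, List.nil_append, zero_add, add_zero]
  have hpop : fspAltScan text.toList 0 ++ [(text.toList.length : Int) + 2] ≠ [] ∧
      (PySem.List.pyGet? (fspAltScan text.toList 0 ++ [(text.toList.length : Int) + 2])
        (-1)).getD 0 ≥ (text.toList.length : Int) := by
    refine ⟨by simp, ?_⟩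
    rw [pyGet?_neg_one_concat]
    simp only [Option.getD_some]
    omega
  rw [if_pos hpop, List.dropLast_concat]
  by_cases hs : fspAltScan text.toList 0 = []
  · rw [if_pos hs, if_pos hs]
    unfold fspAltSent
    have := fallback_eq text.toList text.toList 0 [] (by simp)
    simpa using this
  · rw [if_neg hs, if_neg hs]
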